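-- pv_equiv track=rewrite | github.com/pyronear/hackathon-meteo-france | src/api/services/fwi.py | _fwi_category
-- ===== SOURCE A (Python) =====
-- def _fwi_category(fwi_pixel_val: int) -> int:
--     categories = [
--         (58, 6),
--         (145, 1),
--         (192, 5),
--         (210, 2),
--         (231, 4),
--     ]
--
--     for threshold, risk_value in categories:
--         if fwi_pixel_val <= threshold:
--             return risk_value
--
--     return 3
-- ===== SOURCE B (Python) =====
-- import bisect
--
-- _THRESHOLDS = [58, 145, 192, 210, 231]
-- _VALUES = [6, 1, 5, 2, 4]
--
-- def _fwi_category(fwi_pixel_val: int) -> int: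
--     i = bisect.bisect_left(_THRESHOLDS, fwi_pixel_val)
--     return _VALUES[i] if i < len(_THRESHOLDS) else 3
-- ===== Notes on version B (the rewrite author's own statement) =====
-- stated objective: idiomatic
-- what changed: Replaced the linear scan over (threshold, risk) pairs with bisect_left binary search on a sorted thresholds list plus a parallel values list.
import Mathlib
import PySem

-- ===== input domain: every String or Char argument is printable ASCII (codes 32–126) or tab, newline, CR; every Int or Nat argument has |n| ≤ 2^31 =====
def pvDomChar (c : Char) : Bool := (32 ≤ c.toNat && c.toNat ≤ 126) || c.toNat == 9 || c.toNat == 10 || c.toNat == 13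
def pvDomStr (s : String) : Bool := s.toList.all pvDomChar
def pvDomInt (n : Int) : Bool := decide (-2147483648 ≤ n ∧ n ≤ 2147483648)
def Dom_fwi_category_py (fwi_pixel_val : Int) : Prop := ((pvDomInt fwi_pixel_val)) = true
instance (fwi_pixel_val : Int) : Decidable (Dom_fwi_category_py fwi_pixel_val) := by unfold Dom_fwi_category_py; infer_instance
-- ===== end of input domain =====

-- B replaces A's linear scan over (threshold, risk) pairs with a bisect_left binary search
-- on a sorted thresholds list plus a parallel values list (idiomatic; same cost at n = 5).

-- ===== PORT A =====
-- the 'for threshold, risk_value in categories: if val <= threshold: return risk_value' loop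
def fwiScanA (fwi_pixel_val : Int) : List (Int × Int) → Int
  | [] => 3
  | (threshold, risk_value) :: rest =>
      if fwi_pixel_val ≤ threshold then risk_value else fwiScanA fwi_pixel_val rest

def fwi_category_py (fwi_pixel_val : Int) : Int :=
  fwiScanA fwi_pixel_val [(58, 6), (145, 1), (192, 5), (210, 2), (231, 4)]

-- ===== PORT B =====
-- bisect.bisect_left(a, x) on the concrete thresholds list (CPython's lo/hi binary search)
def bisectLeft (a : List Int) (x : Int) (lo hi : Nat) : Nat :=
  if _h : lo < hi then
    let mid := (lo + hi) / 2
    if a.getD mid 0 < x then bisectLeft a x (mid + 1) hi else bisectLeft a x lo mid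
  else lo
termination_by hi - lo
decreasing_by all_goals omega

def fwiThresholds : List Int := [58, 145, 192, 210, 231]
def fwiValues : List Int := [6, 1, 5, 2, 4]

def fwi_category_py_alt (fwi_pixel_val : Int) : Int :=
  let i := bisectLeft fwiThresholds fwi_pixel_val 0 fwiThresholds.length
  if i < fwiThresholds.length then fwiValues.getD i 0 else 3

-- ===== PRECONDITION & SPEC =====
def Spec_fwi_category_py (fwi_pixel_val : Int) (out : Int) : Prop := out = fwi_category_py_alt fwi_pixel_val
instance (fwi_pixel_val : Int) (out : Int) : Decidable (Spec_fwi_category_py fwi_pixel_val out) := by unfold Spec_fwi_category_py; infer_instance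

-- ===== CLAIM (what is proved, stated in full; the proofs are below) =====
def Claim_equal_fwi_category_py : Prop := ∀ (fwi_pixel_val : Int), Dom_fwi_category_py fwi_pixel_val → Spec_fwi_category_py fwi_pixel_val (fwi_category_py fwi_pixel_val)

-- ===== LEMMAS AND PROOFS =====
theorem bisectLeft_step (a : List Int) (x : Int) (lo hi : Nat) (h : lo < hi) :
    bisectLeft a x lo hi =
      if a.getD ((lo + hi) / 2) 0 < x then bisectLeft a x ((lo + hi) / 2 + 1) hi
      else bisectLeft a x lo ((lo + hi) / 2) := by
  rw [bisectLeft]; simp [h]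

theorem bisectLeft_base (a : List Int) (x : Int) (lo hi : Nat) (h : ¬ lo < hi) :
    bisectLeft a x lo hi = lo := by
  rw [bisectLeft]; simp [h]

-- closed evaluation of the binary search on the concrete thresholds list
theorem bisect_eval (x : Int) : bisectLeft fwiThresholds x 0 5 =
    if 192 < x then (if 210 < x then (if 231 < x then 5 else 4) else 3)
    else (if 145 < x then 2 else (if 58 < x then 1 else 0)) := by
  rw [bisectLeft_step _ _ 0 5 (by norm_num)]
  show (if (192 : Int) < x then bisectLeft fwiThresholds x 3 5 else bisectLeft fwiThresholds x 0 2) = _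
  by_cases h1 : (192 : Int) < x
  · rw [if_pos h1, if_pos h1, bisectLeft_step _ _ 3 5 (by norm_num)]
    show (if (231 : Int) < x then bisectLeft fwiThresholds x 5 5 else bisectLeft fwiThresholds x 3 4) = _
    by_cases h2 : (231 : Int) < x
    · rw [if_pos h2, bisectLeft_base _ _ 5 5 (by norm_num)]
      rw [if_pos (by omega : (210:Int) < x), if_pos h2]
    · rw [if_neg h2, bisectLeft_step _ _ 3 4 (by norm_num)]
      show (if (210 : Int) < x then bisectLeft fwiThresholds x 4 4 else bisectLeft fwiThresholds x 3 3) = _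
      by_cases h3 : (210 : Int) < x
      · rw [if_pos h3, if_pos h3, if_neg h2, bisectLeft_base _ _ 4 4 (by norm_num)]
      · rw [if_neg h3, if_neg h3, bisectLeft_base _ _ 3 3 (by norm_num)]
  · rw [if_neg h1, if_neg h1, bisectLeft_step _ _ 0 2 (by norm_num)]
    show (if (145 : Int) < x then bisectLeft fwiThresholds x 2 2 else bisectLeft fwiThresholds x 0 1) = _
    by_cases h2 : (145 : Int) < x
    · rw [if_pos h2, if_pos h2, bisectLeft_base _ _ 2 2 (by norm_num)]
    · rw [if_neg h2, if_neg h2, bisectLeft_step _ _ 0 1 (by norm_num)]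
      show (if (58 : Int) < x then bisectLeft fwiThresholds x 1 1 else bisectLeft fwiThresholds x 0 0) = _
      by_cases h3 : (58 : Int) < x
      · rw [if_pos h3, if_pos h3, bisectLeft_base _ _ 1 1 (by norm_num)]
      · rw [if_neg h3, if_neg h3, bisectLeft_base _ _ 0 0 (by norm_num)]

-- closed evaluation of B's port, phrased with A's branch conditions
theorem alt_eval (x : Int) : fwi_category_py_alt x =
    if x ≤ 58 then 6 else if x ≤ 145 then 1 else if x ≤ 192 then 5
    else if x ≤ 210 then 2 else if x ≤ 231 then 4 else 3 := by
  unfold fwi_category_py_alt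
  rw [show fwiThresholds.length = 5 from rfl, bisect_eval]
  by_cases h1 : x ≤ 58
  · rw [if_neg (by omega : ¬(192:Int) < x), if_neg (by omega : ¬(145:Int) < x),
        if_neg (by omega : ¬(58:Int) < x), if_pos h1]
    rfl
  · rw [if_neg h1]
    by_cases h2 : x ≤ 145
    · rw [if_neg (by omega : ¬(192:Int) < x), if_neg (by omega : ¬(145:Int) < x),
          if_pos (by omega : (58:Int) < x), if_pos h2]
      rfl
    · rw [if_neg h2]
      by_cases h3 : x ≤ 192
      · rw [if_neg (by omega : ¬(192:Int) < x), if_pos (by omega : (145:Int) < x), if_pos h3]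
        rfl
      · rw [if_neg h3, if_pos (by omega : (192:Int) < x)]
        by_cases h4 : x ≤ 210
        · rw [if_neg (by omega : ¬(210:Int) < x), if_pos h4]
          rfl
        · rw [if_neg h4, if_pos (by omega : (210:Int) < x)]
          by_cases h5 : x ≤ 231
          · rw [if_neg (by omega : ¬(231:Int) < x), if_pos h5]
            rfl
          · rw [if_pos (by omega : (231:Int) < x), if_neg h5]
            rfl

-- ===== VERDICT (by name: the statement is the Claim_ definition above) =====
theorem fwi_category_py_spec : Claim_equal_fwi_category_py := by
  intro x _
  unfold Spec_fwi_category_py fwi_category_py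
  rw [alt_eval]
  simp only [fwiScanA]
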